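-- pv_equiv track=rewrite | github.com/msexton1519/project_euler.py | project_euler.py | project_euler24
-- ===== SOURCE A (Python) =====
-- import itertools
--
-- def project_euler24(perm=1000000):
--     list = itertools.permutations('0123456789')
--     counter = 1
--     for i in list:
--         if counter == perm:
--             return i
--         counter += 1
--     return None
-- ===== SOURCE B (Python) =====
-- def project_euler24(perm=1000000):
--     if perm < 1 or perm > 3628800:
--         return None
--     k = perm - 1
--     digits = list('0123456789')
--     out = []
--     for f in (362880, 40320, 5040, 720, 120, 24, 6, 2, 1, 1):
--         i, k = divmod(k, f)
--         out.append(digits.pop(i))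
--     return tuple(out)
-- ===== Notes on version B (the rewrite author's own statement) =====
-- stated objective: faster
-- what changed: B builds the perm-th permutation directly via the factorial number system (pick digit k//f, continue with k%f) instead of enumerating permutations one by one with a counter until the perm-th.
import Mathlib
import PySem

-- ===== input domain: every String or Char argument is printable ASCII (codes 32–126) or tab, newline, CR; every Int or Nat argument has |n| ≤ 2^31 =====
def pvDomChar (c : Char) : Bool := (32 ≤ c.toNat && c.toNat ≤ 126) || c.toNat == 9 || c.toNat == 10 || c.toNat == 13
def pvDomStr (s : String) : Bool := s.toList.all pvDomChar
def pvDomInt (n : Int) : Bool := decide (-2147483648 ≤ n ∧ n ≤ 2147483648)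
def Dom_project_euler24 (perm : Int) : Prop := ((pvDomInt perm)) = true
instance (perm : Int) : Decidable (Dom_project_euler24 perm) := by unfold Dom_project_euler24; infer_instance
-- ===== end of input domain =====

-- B replaces A's linear scan through itertools.permutations with a direct factoradic
-- construction of the perm-th lexicographic permutation (objective: faster; measured by the check).

-- ===== PORT A =====
-- the digits of '0123456789' as 1-char strings (itertools.permutations of a str yields chars)
def pvDigits : List String := ["0", "1", "2", "3", "4", "5", "6", "7", "8", "9"]

-- itertools.permutations order: for each index i in order, element i first, then
-- permutations of the remainder; n tracks the (remaining) length of xs.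
def pvPermsN : Nat → List String → List (List String)
  | 0, _ => [[]]
  | n + 1, xs =>
      (List.range (n + 1)).flatMap fun i =>
        (pvPermsN n (xs.eraseIdx i)).map (fun p => xs[i]! :: p)

-- the 'for i in list: if counter == perm: return i; counter += 1' loop
def pvScan (perm : Int) : List (List String) → Int → Option (List String)
  | [], _ => none
  | p :: rest, counter =>
      if counter = perm then some p else pvScan perm rest (counter + 1)

def project_euler24 (perm : Int) : Option (List String) :=
  pvScan perm (pvPermsN pvDigits.length pvDigits) 1

-- ===== PORT B =====
-- the factorial weights (362880, 40320, ..., 1, 1) Source B iterates over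
def pvFacts : List Nat := [362880, 40320, 5040, 720, 120, 24, 6, 2, 1, 1]

-- 'i, k = divmod(k, f); out.append(digits.pop(i))' per weight f
def pvPick : List Nat → Nat → List String → List String
  | [], _, _ => []
  | f :: fs, k, digits => digits[k / f]! :: pvPick fs (k % f) (digits.eraseIdx (k / f))

def project_euler24_alt (perm : Int) : Option (List String) :=
  if perm < 1 ∨ 3628800 < perm then none
  else some (pvPick pvFacts (perm - 1).toNat pvDigits)

-- ===== PRECONDITION & SPEC =====
def Spec_project_euler24 (perm : Int) (out : Option (List String)) : Prop := out = project_euler24_alt perm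
instance (perm : Int) (out : Option (List String)) : Decidable (Spec_project_euler24 perm out) := by unfold Spec_project_euler24; infer_instance

-- ===== CLAIM (what is proved, stated in full; the proofs are below) =====
def Claim_equal_project_euler24 : Prop := ∀ (perm : Int), Dom_project_euler24 perm → Spec_project_euler24 perm (project_euler24 perm)

-- ===== LEMMAS AND PROOFS =====

-- the factorial weight list Source B hard-codes, in recursive form
def pvFactList : Nat → List Nat
  | 0 => []
  | n + 1 => Nat.factorial n :: pvFactList n

theorem pvFactList_ten : pvFactList 10 = pvFacts := by
  simp only [pvFactList, pvFacts]
  norm_num [Nat.factorial]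

theorem pvScan_eq (perm : Int) :
    ∀ (l : List (List String)) (c : Int),
      pvScan perm l c =
        if c ≤ perm ∧ perm < c + l.length then l[(perm - c).toNat]? else none := by
  intro l
  induction l with
  | nil => intro c; simp [pvScan]
  | cons p rest ih =>
      intro c
      simp only [pvScan, ih (c + 1), List.length_cons]
      by_cases h : c = perm
      · subst h
        have : (0 : Nat) ≤ rest.length := Nat.zero_le _
        rw [if_pos rfl, if_pos ⟨le_refl c, by push_cast; omega⟩]
        simp
      · rw [if_neg h]
        by_cases h2 : c + 1 ≤ perm ∧ perm < c + 1 + rest.length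
        · rw [if_pos h2, if_pos (by push_cast at h2 ⊢; omega)]
          have he : (perm - c).toNat = (perm - (c + 1)).toNat + 1 := by
            push_cast at h2; omega
          rw [he]
          simp
        · rw [if_neg h2, if_neg (by push_cast at h2 ⊢; omega)]

theorem pvFlatMap_range_length {β : Type} (g : Nat → List β) (L : Nat) :
    ∀ (n : Nat), (∀ i, i < n → (g i).length = L) →
      ((List.range n).flatMap g).length = n * L := by
  intro n
  induction n with
  | zero => intro _; simp
  | succ m ih =>
      intro h
      rw [List.range_succ, List.flatMap_append, List.length_append,
        ih (fun i hi => h i (Nat.lt_succ_of_lt hi))]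
      simp [h m (Nat.lt_succ_self m)]
      ring

theorem pvFlatMap_range_getElem? {β : Type} (g : Nat → List β) (L : Nat) (hL : 0 < L) :
    ∀ (n k : Nat), (∀ i, i < n → (g i).length = L) → k < n * L →
      ((List.range n).flatMap g)[k]? = (g (k / L))[k % L]? := by
  intro n
  induction n with
  | zero => intro k _ hk; omega
  | succ m ih =>
      intro k h hk
      rw [List.range_succ, List.flatMap_append]
      have hlen : ((List.range m).flatMap g).length = m * L :=
        pvFlatMap_range_length g L m (fun i hi => h i (Nat.lt_succ_of_lt hi))
      by_cases hcase : k < m * L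
      · rw [List.getElem?_append_left (by omega)]
        exact ih k (fun i hi => h i (Nat.lt_succ_of_lt hi)) hcase
      · rw [List.getElem?_append_right (by omega)]
        have hs : (m + 1) * L = m * L + L := by ring
        have hrlt : k - m * L < L := by omega
        have hr : k = (k - m * L) + m * L := by omega
        have hdiv : k / L = m := by
          conv_lhs => rw [hr]
          rw [Nat.add_mul_div_right _ _ hL, Nat.div_eq_of_lt hrlt]
          omega
        have hmod : k % L = k - m * L := by
          conv_lhs => rw [hr]
          rw [Nat.add_mul_mod_self_right]
          exact Nat.mod_eq_of_lt hrlt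
        rw [hdiv, hmod, List.flatMap_singleton, hlen]

theorem pvPermsN_length : ∀ (n : Nat) (xs : List String), (pvPermsN n xs).length = Nat.factorial n := by
  intro n
  induction n with
  | zero => intro xs; simp [pvPermsN]
  | succ m ih =>
      intro xs
      rw [pvPermsN,
        pvFlatMap_range_length
          (fun i => (pvPermsN m (xs.eraseIdx i)).map (fun p => xs[i]! :: p))
          (Nat.factorial m) (m + 1)
          (fun i _ => by rw [List.length_map, ih]),
        Nat.factorial_succ]

theorem pvPermsN_getElem? :
    ∀ (n : Nat) (xs : List String) (k : Nat), xs.length = n → k < Nat.factorial n →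
      (pvPermsN n xs)[k]? = some (pvPick (pvFactList n) k xs) := by
  intro n
  induction n with
  | zero =>
      intro xs k _ hk
      interval_cases k
      simp [pvPermsN, pvFactList, pvPick]
  | succ m ih =>
      intro xs k hlen hk
      have hfac : 0 < Nat.factorial m := Nat.factorial_pos m
      rw [pvPermsN,
        pvFlatMap_range_getElem?
          (fun i => (pvPermsN m (xs.eraseIdx i)).map (fun p => xs[i]! :: p))
          (Nat.factorial m) hfac (m + 1) k
          (fun i _ => by rw [List.length_map, pvPermsN_length])
          (by rw [← Nat.factorial_succ]; exact hk)]
      have hdivlt : k / Nat.factorial m < m + 1 := by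
        rw [Nat.div_lt_iff_lt_mul hfac, ← Nat.factorial_succ]; exact hk
      have herase : (xs.eraseIdx (k / Nat.factorial m)).length = m := by
        rw [List.length_eraseIdx, if_pos (by omega)]; omega
      rw [List.getElem?_map, ih _ _ herase (Nat.mod_lt _ hfac)]
      simp [pvFactList, pvPick]

-- ===== VERDICT (by name: the statement is the Claim_ definition above) =====
theorem project_euler24_spec : Claim_equal_project_euler24 := by
  intro perm _
  unfold Spec_project_euler24 project_euler24 project_euler24_alt
  have h10 : Nat.factorial 10 = 3628800 := by norm_num [Nat.factorial]
  have hlen : (pvPermsN pvDigits.length pvDigits).length = 3628800 := by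
    rw [pvPermsN_length]
    show Nat.factorial 10 = 3628800
    exact h10
  rw [pvScan_eq, hlen]
  by_cases h : perm < 1 ∨ 3628800 < perm
  · rw [if_neg (by push_cast; omega), if_pos h]
  · have hk : (perm - 1).toNat < Nat.factorial 10 := by rw [h10]; push_cast at h ⊢; omega
    rw [if_pos (by push_cast; omega), if_neg h,
      pvPermsN_getElem? _ _ _ rfl hk]
    show some (pvPick (pvFactList 10) _ _) = _
    rw [pvFactList_ten]
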